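-- pv_equiv track=rewrite | github.com/litul020209/myPythonRepos | DSA/RECURSION/Dsa_binary_completing_fliping.py | flipping
-- ===== SOURCE A (Python) =====
-- def flipping(bin_str,k):
--     if k!=1:
--        ans=""
--        for x in bin_str:
--             if x == "0":
--               ans=ans+"01"
--             else:
--                 ans=ans+"10"
--        return flipping(ans,k-1)
--     else:
--         return bin_str
-- ===== SOURCE B (Python) =====
-- def flipping(bin_str, k):
--     while k != 1:
--         bin_str = "".join("01" if c == "0" else "10" for c in bin_str)
--         k -= 1
--     return bin_str
-- ===== Notes on version B (the rewrite author's own statement) =====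
-- stated objective: idiomatic
-- what changed: Replaced the tail recursion with an iterative while-loop and replaced the quadratic string-append accumulator of each pass by a single ''.join over a generator.
import Mathlib
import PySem

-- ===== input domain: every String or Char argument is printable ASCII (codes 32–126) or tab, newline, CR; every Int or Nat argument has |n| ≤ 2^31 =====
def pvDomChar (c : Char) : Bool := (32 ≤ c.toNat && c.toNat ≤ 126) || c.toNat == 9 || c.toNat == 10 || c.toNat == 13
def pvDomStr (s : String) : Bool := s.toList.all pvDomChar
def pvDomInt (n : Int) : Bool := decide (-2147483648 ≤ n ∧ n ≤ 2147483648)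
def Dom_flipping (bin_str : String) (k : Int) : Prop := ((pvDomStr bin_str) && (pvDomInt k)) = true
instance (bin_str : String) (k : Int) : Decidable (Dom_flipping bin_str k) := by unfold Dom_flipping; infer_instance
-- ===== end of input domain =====

-- B replaces A's recursion on k by a while-loop and the per-pass string-append accumulator by one join.

-- ===== PORT A =====
-- A recurses with k-1 until k == 1; for k ≥ 1 the recursion depth is exactly (k-1),
-- so the port uses that as structural fuel (fuel exhaustion is only reachable for k < 1,
-- where the Python never returns and which Pre_ excludes).
-- The string concatenation 'ans + "01"' is ported exactly over List Char.
def flippingFuel (s : String) (k : Int) : Nat → String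
  | 0 => s
  | n + 1 =>
    if k ≠ 1 then
      flippingFuel
        (String.ofList (s.toList.foldl
          (fun ans x => ans ++ (if x = '0' then ['0', '1'] else ['1', '0'])) []))
        (k - 1) n
    else s

def flipping (bin_str : String) (k : Int) : String :=
  flippingFuel bin_str k (k - 1).toNat

-- ===== PORT B =====
-- B's while-loop runs exactly (k-1) iterations for k ≥ 1; ported as fuel recursion, the
-- per-pass ''.join(generator) as a flatMap over the characters.
def flipPass (cs : List Char) : List Char :=
  cs.flatMap (fun c => if c = '0' then ['0', '1'] else ['1', '0'])

def flippingAltLoop (cs : List Char) : Nat → List Char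
  | 0 => cs
  | n + 1 => flippingAltLoop (flipPass cs) n

def flipping_alt (bin_str : String) (k : Int) : String :=
  String.ofList (flippingAltLoop bin_str.toList (k - 1).toNat)

-- ===== PRECONDITION & SPEC =====
-- Pre_ excludes k < 1, where the Python A recurses forever (RecursionError) and B's loop never ends.
def Pre_flipping (bin_str : String) (k : Int) : Prop := 1 ≤ k
instance (bin_str : String) (k : Int) : Decidable (Pre_flipping bin_str k) := by
  unfold Pre_flipping; infer_instance

def pvWitness_flipping : String × Int := ("010", 3)

def Spec_flipping (bin_str : String) (k : Int) (out : String) : Prop := out = flipping_alt bin_str k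
instance (bin_str : String) (k : Int) (out : String) : Decidable (Spec_flipping bin_str k out) := by unfold Spec_flipping; infer_instance

-- ===== CLAIM (what is proved, stated in full; the proofs are below) =====
def Claim_equal_flipping : Prop := ∀ (bin_str : String) (k : Int), Dom_flipping bin_str k → Pre_flipping bin_str k → Spec_flipping bin_str k (flipping bin_str k)

-- ===== LEMMAS AND PROOFS =====
theorem flippingFuel_eq_loop (n : Nat) (s : String) (k : Int) (hk : k - 1 = (n : Int)) :
    flippingFuel s k n = String.ofList (flippingAltLoop s.toList n) := by
  induction n generalizing s k with
  | zero => simp [flippingFuel, flippingAltLoop]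
  | succ m ih =>
    have hk1 : k ≠ 1 := by omega
    have hfold : ∀ (cs acc : List Char),
        cs.foldl (fun ans x => ans ++ (if x = '0' then ['0', '1'] else ['1', '0'])) acc
          = acc ++ flipPass cs := by
      intro cs
      induction cs with
      | nil => intro acc; simp [flipPass]
      | cons c cs ihc => intro acc; simp [List.foldl, flipPass, ihc]
    simp only [flippingFuel, hk1, if_pos, ne_eq, not_false_eq_true]
    rw [ih _ (k - 1) (by omega)]
    simp [flippingAltLoop, hfold, String.toList_ofList]

theorem flipping_spec : Claim_equal_flipping := by
  intro s k _ hpre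
  unfold Spec_flipping flipping flipping_alt
  exact flippingFuel_eq_loop (k - 1).toNat s k (by unfold Pre_flipping at hpre; omega)
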